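-- pv_equiv track=rewrite | github.com/ckcm0210/tmp4 | utils/dependency_converter.py | _format_formula_for_display
-- ===== SOURCE A (Python) =====
-- def _format_formula_for_display(formula, max_line_length=50):
--     """
--     將長公式換行以便在 pyvis 節點中更好地顯示。
--     只在有意義的位置斷行，保持可讀性。
--     """
--     if not formula or formula == 'N/A':
--         return 'N/A'
--
--     # 移除開頭的等號（如果有的話）
--     display_formula = formula[1:] if formula.startswith('=') else formula
--
--     if len(display_formula) <= max_line_length:
--         return display_formula
--
--     # 只在有意義的位置斷行：加減乘除運算符
--     break_after = ['+', '-', '*', '/', ',']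
--
--     formatted_formula = ''
--     current_line = ''
--
--     for char in display_formula:
--         current_line += char
--         # 只有在行長度超過限制且遇到運算符時才斷行
--         if len(current_line) >= max_line_length and char in break_after:
--             formatted_formula += current_line + '\n'
--             current_line = ''
--
--     # 添加剩餘的字符
--     if current_line:
--         formatted_formula += current_line
--
--     return formatted_formula
-- ===== SOURCE B (Python) =====
-- def _format_formula_for_display(formula, max_line_length=50):
--     if not formula or formula == 'N/A':
--         return 'N/A'
--
--     display_formula = formula[1:] if formula.startswith('=') else formula
--
--     if len(display_formula) <= max_line_length:
--         return display_formula
--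
--     # candidate break positions: indices of operators/commas, found in one pass
--     break_positions = [i for i, ch in enumerate(display_formula) if ch in '+-*/,']
--
--     segments = []
--     line_start = 0
--     for bp in break_positions:
--         if bp - line_start + 1 >= max_line_length:
--             segments.append(display_formula[line_start:bp + 1])
--             line_start = bp + 1
--
--     return '\n'.join(segments + [display_formula[line_start:]])
-- ===== Notes on version B (the rewrite author's own statement) =====
-- stated objective: alternative
-- what changed: Instead of accumulating a current-line buffer character by character, B collects the operator index positions in one pass and then walks only those candidate break positions, cutting whole slices out of the string and joining segments with newline at the end.
import Mathlib
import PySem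

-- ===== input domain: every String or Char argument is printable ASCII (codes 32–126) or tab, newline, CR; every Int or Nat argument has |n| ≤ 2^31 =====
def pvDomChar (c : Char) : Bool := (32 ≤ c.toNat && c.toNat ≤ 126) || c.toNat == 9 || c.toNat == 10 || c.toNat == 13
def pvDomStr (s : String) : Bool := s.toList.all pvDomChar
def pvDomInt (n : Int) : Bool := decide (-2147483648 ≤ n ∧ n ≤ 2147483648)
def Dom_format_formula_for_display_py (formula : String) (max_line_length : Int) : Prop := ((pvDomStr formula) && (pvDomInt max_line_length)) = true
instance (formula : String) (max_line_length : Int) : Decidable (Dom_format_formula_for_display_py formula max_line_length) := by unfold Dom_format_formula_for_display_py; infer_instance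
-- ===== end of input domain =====

-- B walks a precomputed list of operator positions and slices whole segments out of the
-- string, instead of A's character-by-character current-line buffer; same cost, different
-- decomposition ("alternative").

-- ===== PORT A =====
def pvOps : List Char := ['+', '-', '*', '/', ',']

-- loop body: current_line += char; emit when long enough and char is an operator
def pvStepA (m : Int) (st : List Char × List Char) (c : Char) : List Char × List Char :=
  let cur := st.2 ++ [c]
  if m ≤ (cur.length : Int) ∧ pvOps.contains c then (st.1 ++ cur ++ ['\n'], []) else (st.1, cur)

def format_formula_for_display_py (formula : String) (max_line_length : Int) : String :=
  if formula = "" ∨ formula = "N/A" then "N/A"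
  else
    let display : List Char :=
      if PySem.Chars.startswith formula.toList ['='] then PySem.List.slice formula.toList (some 1) none
      else formula.toList
    if (display.length : Int) ≤ max_line_length then String.ofList display
    else
      let r := display.foldl (pvStepA max_line_length) ([], [])
      if r.2 ≠ [] then String.ofList (r.1 ++ r.2) else String.ofList r.1

-- ===== PORT B =====
-- [i for i, ch in enumerate(s) if ch in '+-*/,'] as the obvious recursion over (index, rest)
def pvBps (i : Nat) (cs : List Char) : List Nat :=
  match cs with
  | [] => []
  | c :: rest => if pvOps.contains c then i :: pvBps (i + 1) rest else pvBps (i + 1) rest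

-- loop body over candidate break positions; s[line_start:bp+1] is drop/take since
-- 0 ≤ line_start ≤ bp + 1 ≤ len(s) always holds here (PySem.List.slice_natCast shape)
def pvStepB (m : Int) (full : List Char) (st : List (List Char) × Nat) (bp : Nat) : List (List Char) × Nat :=
  if m ≤ (bp : Int) - (st.2 : Int) + 1 then
    (st.1 ++ [(full.drop st.2).take (bp + 1 - st.2)], bp + 1)
  else st

def format_formula_for_display_py_alt (formula : String) (max_line_length : Int) : String :=
  if formula = "" ∨ formula = "N/A" then "N/A"
  else
    let display : List Char :=
      if PySem.Chars.startswith formula.toList ['='] then PySem.List.slice formula.toList (some 1) none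
      else formula.toList
    if (display.length : Int) ≤ max_line_length then String.ofList display
    else
      let r := (pvBps 0 display).foldl (pvStepB max_line_length display) ([], 0)
      String.ofList (List.intercalate ['\n'] (r.1 ++ [display.drop r.2]))

-- ===== PRECONDITION & SPEC =====
def Spec_format_formula_for_display_py (formula : String) (max_line_length : Int) (out : String) : Prop := out = format_formula_for_display_py_alt formula max_line_length
instance (formula : String) (max_line_length : Int) (out : String) : Decidable (Spec_format_formula_for_display_py formula max_line_length out) := by unfold Spec_format_formula_for_display_py; infer_instance

-- ===== CLAIM (what is proved, stated in full; the proofs are below) =====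
def Claim_equal_format_formula_for_display_py : Prop := ∀ (formula : String) (max_line_length : Int), Dom_format_formula_for_display_py formula max_line_length → Spec_format_formula_for_display_py formula max_line_length (format_formula_for_display_py formula max_line_length)

-- ===== LEMMAS AND PROOFS =====

-- B's fold only appends to the segment accumulator
lemma pvFoldB_acc (m : Int) (full : List Char) :
    ∀ (bps : List Nat) (segs : List (List Char)) (start : Nat),
      bps.foldl (pvStepB m full) (segs, start) =
        (segs ++ (bps.foldl (pvStepB m full) ([], start)).1,
         (bps.foldl (pvStepB m full) ([], start)).2) := by
  intro bps
  induction bps with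
  | nil => intro segs start; simp
  | cons bp bps ih =>
      intro segs start
      simp only [List.foldl_cons, pvStepB]
      split
      · simp only [List.nil_append]
        rw [ih (segs ++ [_]), ih [(full.drop start).take (bp + 1 - start)]]
        simp
      · exact ih segs start

-- joining segments with '\n' and appending the remainder, in flatMap form
lemma pvIntercalate_eq (segs : List (List Char)) (rem : List Char) :
    List.intercalate ['\n'] (segs ++ [rem]) = segs.flatMap (fun l => l ++ ['\n']) ++ rem := by
  induction segs with
  | nil => simp [List.intercalate]
  | cons s rest ih =>
      cases rest with
      | nil => simp [List.intercalate, List.intersperse] at ih ⊢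
      | cons t ts => simp [List.intercalate, List.intersperse] at ih ⊢; simp [ih]

-- main invariant: A's buffer walk over the suffix equals B's walk over the remaining
-- candidate positions
lemma pvTakeSeg (cur rest : List Char) (c : Char) :
    (cur ++ c :: rest).take (cur.length + 1) = cur ++ [c] := by
  have h := List.take_left (l₁ := cur ++ [c]) (l₂ := rest)
  simpa using h

lemma pvMain (m : Int) (full : List Char) :
    ∀ (rest : List Char) (start : Nat) (cur acc : List Char),
      full.drop start = cur ++ rest →
      (let r := rest.foldl (pvStepA m) (acc, cur); r.1 ++ r.2) =
        acc ++ ((let s := (pvBps (start + cur.length) rest).foldl (pvStepB m full) ([], start);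
                 s.1.flatMap (fun l => l ++ ['\n']) ++ full.drop s.2)) := by
  intro rest
  induction rest with
  | nil =>
      intro start cur acc h
      simp only [pvBps, List.foldl_nil, List.flatMap_nil, List.nil_append]
      simp [h]
  | cons c rest ih =>
      intro start cur acc h
      have hlen : ((cur ++ [c]).length : Int) = (cur.length : Int) + 1 := by
        simp
      by_cases hc : pvOps.contains c = true
      · by_cases hm : m ≤ (cur.length : Int) + 1
        · -- both emit a line here
          have hseg : (full.drop start).take (start + cur.length + 1 - start) = cur ++ [c] := by
            rw [h, show start + cur.length + 1 - start = cur.length + 1 by omega]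
            exact pvTakeSeg cur rest c
          have hdrop : full.drop (start + cur.length + 1) = rest := by
            have h2 := congrArg (List.drop (cur.length + 1)) h
            rw [List.drop_drop] at h2
            have h3 : (cur ++ c :: rest).drop (cur.length + 1) = rest := by
              simp
            rw [h3] at h2
            rw [show start + cur.length + 1 = start + (cur.length + 1) by omega]
            exact h2
          have hA : rest.foldl (pvStepA m) (acc ++ (cur ++ [c]) ++ ['\n'], []) =
              rest.foldl (pvStepA m) (pvStepA m (acc, cur) c) := by
            simp only [pvStepA]
            rw [if_pos ⟨by rw [hlen]; exact hm, hc⟩]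
          have hcond : m ≤ ((start + cur.length : Nat) : Int) - ((start : Nat) : Int) + 1 := by
            push_cast; omega
          simp only [List.foldl_cons, pvBps, if_pos hc, pvStepB, if_pos hcond]
          rw [← hA]
          rw [pvFoldB_acc m full _ ([] ++ [(full.drop start).take (start + cur.length + 1 - start)])]
          have ihr := ih (start + cur.length + 1) [] (acc ++ (cur ++ [c]) ++ ['\n'])
            (by simpa using hdrop)
          simp only [List.length_nil, Nat.add_zero] at ihr
          rw [ihr, hseg]
          simp
        · -- operator, but line still short: neither emits
          have hcond : ¬ m ≤ ((start + cur.length : Nat) : Int) - ((start : Nat) : Int) + 1 := by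
            push_cast; omega
          have hA : pvStepA m (acc, cur) c = (acc, cur ++ [c]) := by
            simp only [pvStepA]
            rw [if_neg (by rw [hlen]; exact fun hp => hm hp.1)]
          simp only [List.foldl_cons, pvBps, if_pos hc, pvStepB, if_neg hcond, hA]
          have ihr := ih start (cur ++ [c]) acc (by simpa using h)
          rw [show start + (cur ++ [c]).length = start + cur.length + 1 by simp; omega] at ihr
          exact ihr
      · -- not an operator: neither emits
        have hA : pvStepA m (acc, cur) c = (acc, cur ++ [c]) := by
          simp only [pvStepA]
          rw [if_neg (fun hp => hc hp.2)]
        simp only [List.foldl_cons, pvBps, if_neg hc, hA]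
        have ihr := ih start (cur ++ [c]) acc (by simpa using h)
        rw [show start + (cur ++ [c]).length = start + cur.length + 1 by simp; omega] at ihr
        exact ihr

-- ===== VERDICT (by name: the statement is the Claim_ definition above) =====
theorem format_formula_for_display_py_spec : Claim_equal_format_formula_for_display_py := by
  intro formula m _hdom
  unfold Spec_format_formula_for_display_py format_formula_for_display_py
    format_formula_for_display_py_alt
  by_cases h1 : formula = "" ∨ formula = "N/A"
  · simp only [if_pos h1]
  · simp only [if_neg h1]
    set display := (if PySem.Chars.startswith formula.toList ['='] then
        PySem.List.slice formula.toList (some 1) none else formula.toList) with hd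
    by_cases h2 : (display.length : Int) ≤ m
    · simp only [if_pos h2]
    · simp only [if_neg h2]
      have hmain := pvMain m display display 0 [] [] (by simp)
      simp only [List.length_nil, Nat.add_zero, List.nil_append] at hmain
      rw [pvIntercalate_eq]
      by_cases h3 : (display.foldl (pvStepA m) ([], [])).2 = []
      · rw [if_neg (fun hh => hh h3)]
        refine congrArg String.ofList ?_
        rw [← hmain, h3, List.append_nil]
      · rw [if_pos h3]
        exact congrArg String.ofList hmain
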